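-- pv_equiv track=rewrite | github.com/vlasvlasvlas/pg-autometadata | src/pg_autometadata/pipeline.py | apply_scope_filters
-- ===== SOURCE A (Python) =====
-- from typing import Any, Dict, Iterable, List, Optional
--
-- def apply_scope_filters(records: List[Dict[str, Any]], cfg: Dict[str, Any]) -> List[Dict[str, Any]]:
--     scope = cfg.get("scope", {})
--     include_schemas = set(scope.get("include_schemas", []))
--     exclude_schemas = set(scope.get("exclude_schemas", []))
--     include_tables = set(scope.get("include_tables", []))
--     exclude_tables = set(scope.get("exclude_tables", []))
--     include_columns = set(scope.get("include_columns", []))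
--     exclude_columns = set(scope.get("exclude_columns", []))
--     include_relations = set(scope.get("include_relations", []))
--
--     type_filters = cfg.get("column_type_filters", {})
--     include_types = set(type_filters.get("include_data_types", []))
--     exclude_types = set(type_filters.get("exclude_data_types", []))
--
--     out = []
--     for r in records:
--         schema_name = r.get("schema_name")
--         table_name = r.get("table_name")
--         column_name = r.get("column_name")
--         data_type = r.get("data_type")
--         udt_name = r.get("udt_name")
--         relation_type = r.get("relation_type")
--
--         if include_schemas and schema_name not in include_schemas:
--             continue
--         if schema_name in exclude_schemas:
--             continue
--
--         if include_tables and table_name not in include_tables: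
--             continue
--         if table_name in exclude_tables:
--             continue
--
--         if include_columns and column_name not in include_columns:
--             continue
--         if column_name in exclude_columns:
--             continue
--
--         if include_relations and relation_type and relation_type not in include_relations:
--             continue
--
--         type_candidates = {str(data_type or "").lower(), str(udt_name or "").lower()}
--         normalized_include_types = {str(x).lower() for x in include_types}
--         normalized_exclude_types = {str(x).lower() for x in exclude_types}
--
--         if normalized_include_types and type_candidates.isdisjoint(normalized_include_types):
--             continue
--         if type_candidates.intersection(normalized_exclude_types):
--             continue
--
--         out.append(r)
--
--     return out
-- ===== SOURCE B (Python) =====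
-- def _name_ok(value, inc, exc):
--     return (not inc or value in inc) and value not in exc
--
-- def _relation_ok(rel, inc_r):
--     return not inc_r or not rel or rel in inc_r
--
-- def _type_ok(r, norm_inc, norm_exc):
--     cands = [str(r.get("data_type") or "").lower(), str(r.get("udt_name") or "").lower()]
--     return (not norm_inc or any(c in norm_inc for c in cands)) and not any(c in norm_exc for c in cands)
--
-- def apply_scope_filters(records, cfg):
--     scope = cfg.get("scope", {})
--     type_filters = cfg.get("column_type_filters", {})
--     norm_inc = {str(x).lower() for x in type_filters.get("include_data_types", [])}
--     norm_exc = {str(x).lower() for x in type_filters.get("exclude_data_types", [])}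
--     recs = records
--     recs = [r for r in recs if _name_ok(r.get("schema_name"),
--                                        scope.get("include_schemas", []),
--                                        scope.get("exclude_schemas", []))]
--     recs = [r for r in recs if _name_ok(r.get("table_name"),
--                                         scope.get("include_tables", []),
--                                         scope.get("exclude_tables", []))]
--     recs = [r for r in recs if _name_ok(r.get("column_name"),
--                                         scope.get("include_columns", []),
--                                         scope.get("exclude_columns", []))]
--     recs = [r for r in recs if _relation_ok(r.get("relation_type"),
--                                             scope.get("include_relations", []))]
--     recs = [r for r in recs if _type_ok(r, norm_inc, norm_exc)]
--     return recs
-- ===== Notes on version B (the rewrite author's own statement) =====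
-- stated objective: simpler
-- what changed: Replaces A's single loop with nine stacked `continue` guards by a chain of five independent list-comprehension filtering passes (schema, table, column, relation, type), with the normalized type sets precomputed once outside the loop instead of being rebuilt per record.
import Mathlib
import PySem

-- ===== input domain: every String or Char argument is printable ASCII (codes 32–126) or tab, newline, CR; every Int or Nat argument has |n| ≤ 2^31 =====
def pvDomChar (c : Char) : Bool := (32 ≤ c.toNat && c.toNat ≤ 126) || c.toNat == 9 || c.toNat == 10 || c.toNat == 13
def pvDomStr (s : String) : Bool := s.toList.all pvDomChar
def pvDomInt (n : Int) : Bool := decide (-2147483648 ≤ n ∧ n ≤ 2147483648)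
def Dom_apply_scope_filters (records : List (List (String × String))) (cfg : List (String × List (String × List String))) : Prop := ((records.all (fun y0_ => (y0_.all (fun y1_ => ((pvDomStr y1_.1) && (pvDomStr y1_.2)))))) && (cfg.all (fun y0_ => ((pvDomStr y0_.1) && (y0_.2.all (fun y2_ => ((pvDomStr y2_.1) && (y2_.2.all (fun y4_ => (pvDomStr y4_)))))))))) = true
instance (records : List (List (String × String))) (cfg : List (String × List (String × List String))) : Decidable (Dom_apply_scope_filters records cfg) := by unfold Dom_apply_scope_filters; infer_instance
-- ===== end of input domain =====

-- B rewrites A's single loop with stacked `continue` guards as a chain of five separate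
-- list-comprehension filtering passes (schema, table, column, relation, type), with the
-- normalized type sets precomputed once; objective: simpler decomposition, same cost.

-- Python `x in container` where x may be None (a missing record key): None is never in a
-- container of strings, so the `none` case is `false`.
def pvOptIn (v : Option String) (l : List String) : Bool :=
  match v with
  | some s => l.contains s
  | none => false

-- Python truthiness of an Optional[str]: None and "" are falsy.
def pvTruthy (v : Option String) : Bool :=
  match v with
  | some s => s ≠ ""
  | none => false

-- ===== PORT A =====
def apply_scope_filters (records : List (List (String × String))) (cfg : List (String × List (String × List String))) : List (List (String × String)) :=
  let scope := PySem.Dict.mk ((PySem.Dict.mk cfg).getD "scope" [])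
  let include_schemas : PySem.Set String := PySem.Set.ofList (scope.getD "include_schemas" [])
  let exclude_schemas : PySem.Set String := PySem.Set.ofList (scope.getD "exclude_schemas" [])
  let include_tables : PySem.Set String := PySem.Set.ofList (scope.getD "include_tables" [])
  let exclude_tables : PySem.Set String := PySem.Set.ofList (scope.getD "exclude_tables" [])
  let include_columns : PySem.Set String := PySem.Set.ofList (scope.getD "include_columns" [])
  let exclude_columns : PySem.Set String := PySem.Set.ofList (scope.getD "exclude_columns" [])
  let include_relations : PySem.Set String := PySem.Set.ofList (scope.getD "include_relations" [])
  let type_filters := PySem.Dict.mk ((PySem.Dict.mk cfg).getD "column_type_filters" [])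
  let include_types : PySem.Set String := PySem.Set.ofList (type_filters.getD "include_data_types" [])
  let exclude_types : PySem.Set String := PySem.Set.ofList (type_filters.getD "exclude_data_types" [])
  records.foldl (fun out r =>
    let rd := PySem.Dict.mk r
    let schema_name := rd.get? "schema_name"
    let table_name := rd.get? "table_name"
    let column_name := rd.get? "column_name"
    let data_type := rd.get? "data_type"
    let udt_name := rd.get? "udt_name"
    let relation_type := rd.get? "relation_type"
    if !include_schemas.isEmpty && !(pvOptIn schema_name include_schemas) then out
    else if pvOptIn schema_name exclude_schemas then out
    else if !include_tables.isEmpty && !(pvOptIn table_name include_tables) then out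
    else if pvOptIn table_name exclude_tables then out
    else if !include_columns.isEmpty && !(pvOptIn column_name include_columns) then out
    else if pvOptIn column_name exclude_columns then out
    else if !include_relations.isEmpty && pvTruthy relation_type && !(pvOptIn relation_type include_relations) then out
    else
      -- iterating a Python set to build another set: membership-only use, order-independent
      let type_candidates : PySem.Set String := PySem.Set.ofList [PySem.Str.lower (data_type.getD ""), PySem.Str.lower (udt_name.getD "")]
      let normalized_include_types : PySem.Set String := PySem.Set.ofList (include_types.map (fun x => PySem.Str.lower x))
      let normalized_exclude_types : PySem.Set String := PySem.Set.ofList (exclude_types.map (fun x => PySem.Str.lower x))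
      if !normalized_include_types.isEmpty && PySem.Set.isdisjoint type_candidates normalized_include_types then out
      else if !(PySem.Set.inter type_candidates normalized_exclude_types).isEmpty then out
      else out ++ [r]) []

-- ===== PORT B =====
def pvNameOk (v : Option String) (inc exc : List String) : Bool :=
  (inc.isEmpty || pvOptIn v inc) && !(pvOptIn v exc)

def pvRelationOk (rel : Option String) (incR : List String) : Bool :=
  incR.isEmpty || !(pvTruthy rel) || pvOptIn rel incR

def pvTypeOk (r : List (String × String)) (normInc normExc : PySem.Set String) : Bool :=
  let cands := [PySem.Str.lower (((PySem.Dict.mk r).get? "data_type").getD ""),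
                PySem.Str.lower (((PySem.Dict.mk r).get? "udt_name").getD "")]
  (normInc.isEmpty || cands.any (fun c => PySem.Set.contains normInc c)) &&
    !(cands.any (fun c => PySem.Set.contains normExc c))

def apply_scope_filters_alt (records : List (List (String × String))) (cfg : List (String × List (String × List String))) : List (List (String × String)) :=
  let scope := PySem.Dict.mk ((PySem.Dict.mk cfg).getD "scope" [])
  let type_filters := PySem.Dict.mk ((PySem.Dict.mk cfg).getD "column_type_filters" [])
  let normInc : PySem.Set String := PySem.Set.ofList ((type_filters.getD "include_data_types" []).map (fun x => PySem.Str.lower x))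
  let normExc : PySem.Set String := PySem.Set.ofList ((type_filters.getD "exclude_data_types" []).map (fun x => PySem.Str.lower x))
  let recs := records
  let recs := recs.filter (fun r => pvNameOk ((PySem.Dict.mk r).get? "schema_name") (scope.getD "include_schemas" []) (scope.getD "exclude_schemas" []))
  let recs := recs.filter (fun r => pvNameOk ((PySem.Dict.mk r).get? "table_name") (scope.getD "include_tables" []) (scope.getD "exclude_tables" []))
  let recs := recs.filter (fun r => pvNameOk ((PySem.Dict.mk r).get? "column_name") (scope.getD "include_columns" []) (scope.getD "exclude_columns" []))
  let recs := recs.filter (fun r => pvRelationOk ((PySem.Dict.mk r).get? "relation_type") (scope.getD "include_relations" []))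
  let recs := recs.filter (fun r => pvTypeOk r normInc normExc)
  recs

-- ===== PRECONDITION & SPEC =====
def Spec_apply_scope_filters (records : List (List (String × String))) (cfg : List (String × List (String × List String))) (out : List (List (String × String))) : Prop := out = apply_scope_filters_alt records cfg
instance (records : List (List (String × String))) (cfg : List (String × List (String × List String))) (out : List (List (String × String))) : Decidable (Spec_apply_scope_filters records cfg out) := by unfold Spec_apply_scope_filters; infer_instance

-- ===== CLAIM (what is proved, stated in full; the proofs are below) =====
def Claim_equal_apply_scope_filters : Prop := ∀ (records : List (List (String × String))) (cfg : List (String × List (String × List String))), Dom_apply_scope_filters records cfg → Spec_apply_scope_filters records cfg (apply_scope_filters records cfg)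

-- ===== LEMMAS AND PROOFS =====

-- A guard-style foldl (append the element unless some guard fires) is a filter.
theorem pv_foldl_step_filter {α : Type} (p : α → Bool) (f : List α → α → List α)
    (hf : ∀ out r, f out r = if p r then out ++ [r] else out) :
    ∀ (l : List α) (acc : List α), l.foldl f acc = acc ++ l.filter p := by
  intro l
  induction l with
  | nil => intro acc; simp
  | cons x xs ih =>
    intro acc
    rw [List.foldl_cons, hf, List.filter_cons]
    split <;> simp [ih]

theorem pv_ofList_isEmpty (l : List String) :
    (PySem.Set.ofList l).isEmpty = l.isEmpty := by
  cases l with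
  | nil => rfl
  | cons x xs => rw [PySem.Set.ofList_cons]; rfl

theorem pv_optIn_ofList (v : Option String) (l : List String) :
    pvOptIn v (PySem.Set.ofList l) = pvOptIn v l := by
  cases v with
  | none => rfl
  | some s => simp [pvOptIn, PySem.Set.mem_ofList]

theorem pv_nestedIf {α : Type} (out : List α) (r : α) (c1 c2 c3 c4 c5 c6 c7 c8 c9 : Bool) :
    (if c1 then out else if c2 then out else if c3 then out else if c4 then out
     else if c5 then out else if c6 then out else if c7 then out else if c8 then out
     else if c9 then out else out ++ [r]) =
    (if !c1 && !c2 && !c3 && !c4 && !c5 && !c6 && !c7 && !c8 && !c9 then out ++ [r] else out) := by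
  cases c1 <;> cases c2 <;> cases c3 <;> cases c4 <;> cases c5 <;> cases c6 <;> cases c7 <;>
    cases c8 <;> cases c9 <;> simp

theorem pv_map_ofList_isEmpty (l : List String) (f : String → String) :
    ((PySem.Set.ofList l).map f).isEmpty = (l.map f).isEmpty := by
  cases l with
  | nil => rfl
  | cons x xs => rw [PySem.Set.ofList_cons]; rfl

theorem pv_disj_bridge (a b : String) (l : List String) :
    PySem.Set.isdisjoint (PySem.Set.ofList [a, b]) (PySem.Set.ofList ((PySem.Set.ofList l).map (fun y => PySem.Str.lower y))) =
      !([a, b].any (fun c => (PySem.Set.ofList (l.map (fun y => PySem.Str.lower y))).contains c)) := by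
  rw [Bool.eq_iff_iff]
  simp [PySem.Set.isdisjoint_iff, PySem.Set.mem_ofList]

theorem pv_inter_bridge (a b : String) (l : List String) :
    (PySem.Set.inter (PySem.Set.ofList [a, b]) (PySem.Set.ofList ((PySem.Set.ofList l).map (fun y => PySem.Str.lower y)))).isEmpty =
      !([a, b].any (fun c => (PySem.Set.ofList (l.map (fun y => PySem.Str.lower y))).contains c)) := by
  rw [Bool.eq_iff_iff]
  simp [List.isEmpty_iff, List.eq_nil_iff_forall_not_mem, PySem.Set.mem_inter, PySem.Set.mem_ofList]


-- the heart of the proof: A's guarded loop, over arbitrary scope lists, is B's filter chain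
set_option maxHeartbeats 3200000 in
theorem pv_core (incS excS incT excT incC excC incR incTy excTy : List String)
    (records : List (List (String × String))) :
    records.foldl (fun out r =>
      let rd := PySem.Dict.mk r
      let schema_name := rd.get? "schema_name"
      let table_name := rd.get? "table_name"
      let column_name := rd.get? "column_name"
      let data_type := rd.get? "data_type"
      let udt_name := rd.get? "udt_name"
      let relation_type := rd.get? "relation_type"
      if !(PySem.Set.ofList incS).isEmpty && !(pvOptIn schema_name (PySem.Set.ofList incS)) then out
      else if pvOptIn schema_name (PySem.Set.ofList excS) then out
      else if !(PySem.Set.ofList incT).isEmpty && !(pvOptIn table_name (PySem.Set.ofList incT)) then out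
      else if pvOptIn table_name (PySem.Set.ofList excT) then out
      else if !(PySem.Set.ofList incC).isEmpty && !(pvOptIn column_name (PySem.Set.ofList incC)) then out
      else if pvOptIn column_name (PySem.Set.ofList excC) then out
      else if !(PySem.Set.ofList incR).isEmpty && pvTruthy relation_type && !(pvOptIn relation_type (PySem.Set.ofList incR)) then out
      else
        let type_candidates : PySem.Set String := PySem.Set.ofList [PySem.Str.lower (data_type.getD ""), PySem.Str.lower (udt_name.getD "")]
        let normalized_include_types : PySem.Set String := PySem.Set.ofList ((PySem.Set.ofList incTy).map (fun x => PySem.Str.lower x))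
        let normalized_exclude_types : PySem.Set String := PySem.Set.ofList ((PySem.Set.ofList excTy).map (fun x => PySem.Str.lower x))
        if !normalized_include_types.isEmpty && PySem.Set.isdisjoint type_candidates normalized_include_types then out
        else if !(PySem.Set.inter type_candidates normalized_exclude_types).isEmpty then out
        else out ++ [r]) [] =
    ((((records.filter (fun r => pvNameOk ((PySem.Dict.mk r).get? "schema_name") incS excS)).filter
        (fun r => pvNameOk ((PySem.Dict.mk r).get? "table_name") incT excT)).filter
        (fun r => pvNameOk ((PySem.Dict.mk r).get? "column_name") incC excC)).filter
        (fun r => pvRelationOk ((PySem.Dict.mk r).get? "relation_type") incR)).filter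
        (fun r => pvTypeOk r (PySem.Set.ofList (incTy.map (fun x => PySem.Str.lower x)))
                            (PySem.Set.ofList (excTy.map (fun x => PySem.Str.lower x)))) := by
  rw [pv_foldl_step_filter (p := fun r =>
      pvTypeOk r (PySem.Set.ofList (incTy.map (fun x => PySem.Str.lower x)))
                 (PySem.Set.ofList (excTy.map (fun x => PySem.Str.lower x))) &&
      pvRelationOk ((PySem.Dict.mk r).get? "relation_type") incR &&
      pvNameOk ((PySem.Dict.mk r).get? "column_name") incC excC &&
      pvNameOk ((PySem.Dict.mk r).get? "table_name") incT excT &&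
      pvNameOk ((PySem.Dict.mk r).get? "schema_name") incS excS)]
  · rw [List.nil_append, List.filter_filter, List.filter_filter, List.filter_filter, List.filter_filter]
  · intro out r
    show (if _ then out else _) = _
    rw [pv_nestedIf]
    simp only [pvNameOk, pvRelationOk, pvTypeOk, pv_optIn_ofList, pv_ofList_isEmpty,
      pv_map_ofList_isEmpty, pv_disj_bridge, pv_inter_bridge, PySem.Set.contains_eq_listContains]
    refine if_congr ?_ rfl rfl
    simp only [Bool.and_eq_true, Bool.or_eq_true, Bool.not_eq_true', Bool.eq_false_iff, ne_eq]
    tauto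

-- ===== VERDICT (by name: the statement is the Claim_ definition above) =====
theorem apply_scope_filters_spec : Claim_equal_apply_scope_filters := by
  intro records cfg _
  exact pv_core _ _ _ _ _ _ _ _ _ records
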